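-- pv_equiv track=rewrite | github.com/Emear/Lab-6 | Lab6.py | encode_password
-- ===== SOURCE A (Python) =====
-- def encode_password(password):
--     encoded = ""
--     for char in str(password):
--         if char.isdigit():
--             digit = int(char)
--             if 0 <= digit <= 6:
--                 encoded_digit = (digit + 3) % 10
--             else:
--                 encoded_digit = (digit - 7) % 10
--             encoded += str(encoded_digit)
--         else:
--             encoded += char
--     return encoded
-- ===== SOURCE B (Python) =====
-- _ROT = '3456789012'  # _ROT[d] is the encoding of digit d: rotation by +3 mod 10
--
--
-- def _enc(s):
--     # divide and conquer: O(log n) recursion depth, concatenating encoded halves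
--     if len(s) <= 1:
--         if s and '0' <= s <= '9':
--             return _ROT[ord(s) - 48]
--         return s
--     mid = len(s) // 2
--     return _enc(s[:mid]) + _enc(s[mid:])
--
--
-- def encode_password(password):
--     return _enc(str(password))
-- ===== Notes on version B (the rewrite author's own statement) =====
-- stated objective: alternative
-- what changed: Both of A's branches are the rotation (d+3)%10, so B encodes by divide-and-conquer: it splits the string in half, recurses on each half (single-character base case looks the digit up in the rotated literal '3456789012' by character code) and concatenates, replacing A's left-to-right accumulator loop with int()/str() branch arithmetic.
import Mathlib
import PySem

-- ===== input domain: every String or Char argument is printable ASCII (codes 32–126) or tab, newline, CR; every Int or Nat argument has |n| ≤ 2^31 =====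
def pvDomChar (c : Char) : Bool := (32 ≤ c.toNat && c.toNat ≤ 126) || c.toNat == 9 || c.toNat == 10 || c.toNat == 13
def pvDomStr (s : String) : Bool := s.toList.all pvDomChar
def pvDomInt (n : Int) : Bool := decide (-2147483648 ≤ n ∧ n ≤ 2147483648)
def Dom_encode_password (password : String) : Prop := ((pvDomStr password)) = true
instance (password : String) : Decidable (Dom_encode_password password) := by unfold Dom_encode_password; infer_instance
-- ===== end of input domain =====

-- B replaces A's left-to-right accumulator loop (int()/str() branch arithmetic) with a
-- divide-and-conquer recursion whose base case indexes the rotated digit string; equal return values proved.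

-- ===== PORT A =====
-- char-by-char loop: acc ++ shifted digit (int(char) on an ASCII digit char is c.toNat - 48, exact under isdigit)
def encode_password (password : String) : String :=
  String.ofList (password.toList.foldl (fun acc c =>
    if PySem.Chars.isdigit c then
      let digit : Int := (c.toNat : Int) - 48
      let encoded_digit : Int :=
        if 0 ≤ digit ∧ digit ≤ 6 then PySem.Int.mod (digit + 3) 10
        else PySem.Int.mod (digit - 7) 10
      acc ++ PySem.Int.toChars encoded_digit
    else acc ++ [c]) [])

-- ===== PORT B =====
-- Source B's _enc: split in half, recurse, concatenate; single-char base case looks the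
-- digit up in '3456789012' ('_ROT[ord(s)-48]'; the index is in range whenever the guard holds)
def pvEnc (cs : List Char) : List Char :=
  if cs.length ≤ 1 then
    match cs with
    | [c] =>
      if '0' ≤ c ∧ c ≤ '9' then
        match PySem.List.pyGet? ("3456789012".toList) ((c.toNat : Int) - 48) with
        | some r => [r]
        | none => [c]
      else [c]
    | _ => cs
  else
    pvEnc (cs.take (cs.length / 2)) ++ pvEnc (cs.drop (cs.length / 2))
termination_by cs.length
decreasing_by
  · simp only [List.length_take]; omega
  · simp only [List.length_drop]; omega

def encode_password_alt (password : String) : String :=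
  String.ofList (pvEnc password.toList)

-- ===== PRECONDITION & SPEC =====
def Spec_encode_password (password : String) (out : String) : Prop := out = encode_password_alt password
instance (password : String) (out : String) : Decidable (Spec_encode_password password out) := by unfold Spec_encode_password; infer_instance

-- ===== CLAIM (what is proved, stated in full; the proofs are below) =====
def Claim_equal_encode_password : Prop := ∀ (password : String), Dom_encode_password password → Spec_encode_password password (encode_password password)

-- ===== LEMMAS AND PROOFS =====

-- the per-character result of B's base case
def pvCharB (c : Char) : Char :=
  if '0' ≤ c ∧ c ≤ '9' then
    match PySem.List.pyGet? ("3456789012".toList) ((c.toNat : Int) - 48) with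
    | some r => r
    | none => c
  else c

theorem pvDigit_mem (c : Char) (h1 : '0' ≤ c) (h2 : c ≤ '9') :
    c ∈ ['0','1','2','3','4','5','6','7','8','9'] := by
  have h1' : 48 ≤ c.toNat := h1
  have h2' : c.toNat ≤ 57 := h2
  have hv : c = Char.ofNat c.toNat := (Char.ofNat_toNat c).symm
  interval_cases h : c.toNat <;> simp [hv]

-- base case of B's recursion, per character
theorem pvEnc_single (c : Char) : pvEnc [c] = [pvCharB c] := by
  rw [pvEnc]
  simp only [pvCharB, List.length_cons, List.length_nil]
  norm_num
  rcases hr : PySem.List.pyGet? ("3456789012".toList) ((c.toNat : Int) - 48) with _ | r <;>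
    split_ifs with h <;> simp [hr]

-- B: the divide-and-conquer recursion is the pointwise map of pvCharB
theorem pvEnc_eq_map (cs : List Char) : pvEnc cs = cs.map pvCharB := by
  induction hn : cs.length using Nat.strong_induction_on generalizing cs with
  | _ n ih =>
    by_cases h1 : cs.length ≤ 1
    · rcases cs with _ | ⟨c, _ | ⟨d, rest⟩⟩
      · rw [pvEnc.eq_def]; simp
      · rw [pvEnc_single]; simp
      · simp at h1
    · rw [pvEnc.eq_def, if_neg h1]
      have h2 : (cs.take (cs.length / 2)).length < n := by
        simp only [List.length_take]; omega
      have h3 : (cs.drop (cs.length / 2)).length < n := by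
        simp only [List.length_drop]; omega
      rw [ih _ h2 _ rfl, ih _ h3 _ rfl, ← List.map_append, List.take_append_drop]

-- A's loop body as a per-character function
def pvStepA (c : Char) : List Char :=
  if PySem.Chars.isdigit c then
    let digit : Int := (c.toNat : Int) - 48
    let encoded_digit : Int :=
      if 0 ≤ digit ∧ digit ≤ 6 then PySem.Int.mod (digit + 3) 10
      else PySem.Int.mod (digit - 7) 10
    PySem.Int.toChars encoded_digit
  else [c]

-- per character, A's step yields exactly B's character
theorem pvStep_eq (c : Char) : pvStepA c = [pvCharB c] := by
  by_cases h : PySem.Chars.isdigit c = true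
  · have h' := h
    simp only [PySem.Chars.isdigit, Bool.and_eq_true, decide_eq_true_eq] at h'
    have := pvDigit_mem c h'.1 h'.2
    fin_cases this <;> decide
  · have h2 : ¬ ('0' ≤ c ∧ c ≤ '9') := by
      intro hc
      exact h (by simp [PySem.Chars.isdigit, hc.1, hc.2])
    simp [pvStepA, pvCharB, h, h2]

theorem pvFoldA (cs : List Char) (acc : List Char) :
    cs.foldl (fun acc c =>
      if PySem.Chars.isdigit c then
        let digit : Int := (c.toNat : Int) - 48
        let encoded_digit : Int :=
          if 0 ≤ digit ∧ digit ≤ 6 then PySem.Int.mod (digit + 3) 10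
          else PySem.Int.mod (digit - 7) 10
        acc ++ PySem.Int.toChars encoded_digit
      else acc ++ [c]) acc
    = acc ++ cs.map pvCharB := by
  induction cs generalizing acc with
  | nil => simp
  | cons c cs ih =>
    have hstep : (if PySem.Chars.isdigit c then
        let digit : Int := (c.toNat : Int) - 48
        let encoded_digit : Int :=
          if 0 ≤ digit ∧ digit ≤ 6 then PySem.Int.mod (digit + 3) 10
          else PySem.Int.mod (digit - 7) 10
        acc ++ PySem.Int.toChars encoded_digit
      else acc ++ [c]) = acc ++ pvStepA c := by
      simp only [pvStepA]; split_ifs <;> rfl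
    simp only [List.foldl_cons, hstep, ih, pvStep_eq, List.map_cons, List.append_assoc,
      List.singleton_append]

-- ===== VERDICT (by name: the statement is the Claim_ definition above) =====
theorem encode_password_spec : Claim_equal_encode_password := by
  intro password _
  unfold Spec_encode_password encode_password encode_password_alt
  rw [pvFoldA, pvEnc_eq_map]
  simp
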